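-- pv_equiv track=rewrite | github.com/MrBrantCode/unitest_baseline | mut_generate/mist_train_taco/taco_12166/solution.py | is_graph_possible
-- ===== SOURCE A (Python) =====
-- def is_graph_possible(n, m, q, a_list, b_list, c_list):
--     class UnionFind:
--         def __init__(self, n):
--             self.par = [i for i in range(n + 1)]
--             self.rank = [0] * (n + 1)
--
--         def find(self, x):
--             if self.par[x] == x:
--                 return x
--             else:
--                 self.par[x] = self.find(self.par[x])
--                 return self.par[x]
--
--         def union(self, x, y):
--             x = self.find(x)
--             y = self.find(y)
--             if self.rank[x] < self.rank[y]:
--                 self.par[x] = y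
--             else:
--                 self.par[y] = x
--                 if self.rank[x] == self.rank[y]:
--                     self.rank[x] += 1
--
--         def same_check(self, x, y):
--             return self.find(x) == self.find(y)
--
--     res = 'Yes'
--     uf = UnionFind(n - 1)
--
--     for i in range(q):
--         if c_list[i] == 0:
--             uf.union(a_list[i], b_list[i])
--
--     for i in range(q):
--         if c_list[i] == 1:
--             if uf.same_check(a_list[i], b_list[i]):
--                 res = 'No'
--
--     par_list = [0] * n
--     for i in range(n):
--         par_list[i] = uf.find(i)
--
--     k = len(set(par_list))
--
--     if max(c_list) == 0:
--         min_m = n - 1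
--     else:
--         min_m = n
--
--     if m < min_m:
--         res = 'No'
--     elif m > n + k * (k - 3) // 2:
--         res = 'No'
--
--     return res
-- ===== SOURCE B (Python) =====
-- def is_graph_possible(n, m, q, a_list, b_list, c_list):
--     res = 'Yes'
--     comp = list(range(n))
--     for i in range(q):
--         if c_list[i] == 0:
--             ca = comp[a_list[i]]
--             cb = comp[b_list[i]]
--             if ca != cb:
--                 comp = [ca if v == cb else v for v in comp]
--     for i in range(q):
--         if c_list[i] == 1 and comp[a_list[i]] == comp[b_list[i]]:
--             res = 'No'
--     k = len(set(comp))
--     if max(c_list) == 0: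
--         min_m = n - 1
--     else:
--         min_m = n
--     if m < min_m:
--         res = 'No'
--     elif m > n + k * (k - 3) // 2:
--         res = 'No'
--     return res
-- ===== Notes on version B (the rewrite author's own statement) =====
-- stated objective: simpler
-- what changed: Replaces the recursive rank/path-compression union-find (tree parent array, recursive find with memoizing writes, rank bookkeeping, a final root-collection pass) by a flat component-label list: merging two classes rewrites one label into the other with a comprehension, an equality test on labels replaces same_check, and k is len(set(comp)) directly.
import Mathlib
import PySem

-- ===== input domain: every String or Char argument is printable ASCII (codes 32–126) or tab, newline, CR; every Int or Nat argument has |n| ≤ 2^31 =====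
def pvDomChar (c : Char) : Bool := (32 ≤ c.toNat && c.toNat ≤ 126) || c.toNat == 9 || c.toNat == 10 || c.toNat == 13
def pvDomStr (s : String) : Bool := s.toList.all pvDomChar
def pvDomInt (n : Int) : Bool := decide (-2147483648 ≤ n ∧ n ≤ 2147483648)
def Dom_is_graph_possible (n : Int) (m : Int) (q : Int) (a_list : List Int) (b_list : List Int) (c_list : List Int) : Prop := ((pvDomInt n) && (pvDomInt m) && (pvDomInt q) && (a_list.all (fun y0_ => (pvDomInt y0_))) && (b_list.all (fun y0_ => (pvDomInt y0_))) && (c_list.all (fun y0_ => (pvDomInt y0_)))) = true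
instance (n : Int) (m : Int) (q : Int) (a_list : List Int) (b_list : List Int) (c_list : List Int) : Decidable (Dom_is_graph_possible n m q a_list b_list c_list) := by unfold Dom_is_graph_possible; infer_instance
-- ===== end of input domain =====

-- B replaces A's recursive rank/path-compression union-find by a flat component-label
-- list merged by relabelling (objective: simpler; not claimed faster).

-- ===== PORT A =====
-- Python's list is an array: par/rank/par_list are carried as Array Int so that the
-- port evaluates with Python's O(1) indexing.  aGet?/aSet? are par[x] / par[x] = v with
-- Python's negative-index wrap (none = IndexError), exactly PySem.List.pyGet?/pySet?.
def aGet? (xs : Array Int) (i : Int) : Option Int :=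
  (PySem.List.pyIdx? xs.size i).bind fun k => xs[k]?

def aSet? (xs : Array Int) (i : Int) (v : Int) : Option (Array Int) :=
  (PySem.List.pyIdx? xs.size i).map fun k => xs.setIfInBounds k v

-- UnionFind.find: recursive find with path compression ('self.par[x] = self.find(self.par[x])').
-- The fuel argument (par.size + 1 at every call site) is only a totality guard: the parent
-- structure stays a forest, so the chain to the root is never longer than the array.
def ufFind : Nat → Array Int → Int → Option (Int × Array Int)
  | 0, _, _ => none
  | f+1, par, x =>
    match aGet? par x with
    | none => none
    | some p =>
      if p = x then some (x, par)
      else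
        match ufFind f par p with
        | none => none
        | some rp =>
          match aSet? rp.2 x rp.1 with
          | none => none
          | some par2 => some (rp.1, par2)

-- UnionFind.union (union by rank)
def ufUnion (par rank : Array Int) (x y : Int) : Option (Array Int × Array Int) :=
  match ufFind (par.size + 1) par x with
  | none => none
  | some (x', par1) =>
    match ufFind (par1.size + 1) par1 y with
    | none => none
    | some (y', par2) =>
      match aGet? rank x', aGet? rank y' with
      | some rx, some ry =>
        if rx < ry then
          match aSet? par2 x' y' with
          | none => none
          | some par3 => some (par3, rank)
        else
          match aSet? par2 y' x' with
          | none => none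
          | some par3 =>
            if rx = ry then
              match aSet? rank x' (rx + 1) with
              | none => none
              | some rank2 => some (par3, rank2)
            else some (par3, rank)
      | _, _ => none

-- UnionFind.same_check
def ufSame (par : Array Int) (x y : Int) : Option (Bool × Array Int) :=
  match ufFind (par.size + 1) par x with
  | none => none
  | some (x', par1) =>
    match ufFind (par1.size + 1) par1 y with
    | none => none
    | some (y', par2) => some (decide (x' = y'), par2)

-- first loop: 'if c_list[i] == 0: uf.union(a_list[i], b_list[i])'
def stepA1 (a_list b_list c_list : List Int) (st : Option (Array Int × Array Int)) (i : Int) :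
    Option (Array Int × Array Int) :=
  match st with
  | none => none
  | some (par, rank) =>
    match PySem.List.pyGet? c_list i with
    | none => none
    | some c =>
      if c = 0 then
        match PySem.List.pyGet? a_list i, PySem.List.pyGet? b_list i with
        | some a, some b => ufUnion par rank a b
        | _, _ => none
      else some (par, rank)

-- second loop: 'if c_list[i] == 1: if uf.same_check(...): res = "No"'
def stepA2 (a_list b_list c_list : List Int) (st : Option (String × Array Int)) (i : Int) :
    Option (String × Array Int) :=
  match st with
  | none => none
  | some (res, par) =>
    match PySem.List.pyGet? c_list i with
    | none => none
    | some c =>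
      if c = 1 then
        match PySem.List.pyGet? a_list i, PySem.List.pyGet? b_list i with
        | some a, some b =>
          match ufSame par a b with
          | none => none
          | some (s, par2) => some ((if s then "No" else res), par2)
        | _, _ => none
      else some (res, par)

-- third loop: 'par_list[i] = uf.find(i)'
def stepA3 (st : Option (Array Int × Array Int)) (i : Int) : Option (Array Int × Array Int) :=
  match st with
  | none => none
  | some (pl, par) =>
    match ufFind (par.size + 1) par i with
    | none => none
    | some (r, par2) =>
      match aSet? pl i r with
      | none => none
      | some pl2 => some (pl2, par2)

def is_graph_possible (n : Int) (m : Int) (q : Int) (a_list : List Int) (b_list : List Int) (c_list : List Int) : String :=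
  match (PySem.List.pyRange 0 q 1).foldl (stepA1 a_list b_list c_list)
      (some ((PySem.List.pyRange 0 (n - 1 + 1) 1).toArray,
             Array.replicate (n - 1 + 1).toNat (0 : Int))) with
  | none => ""  -- unreachable under Pre_: Python raised in the first loop
  | some (par, _rank) =>
    match (PySem.List.pyRange 0 q 1).foldl (stepA2 a_list b_list c_list) (some ("Yes", par)) with
    | none => ""
    | some (res, par2) =>
      match (PySem.List.pyRange 0 n 1).foldl stepA3
          (some (Array.replicate n.toNat (0 : Int), par2)) with
      | none => ""
      | some (pl, _) =>
        -- k = len(set(par_list)): Python's set is a hash set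
        let k : Int := ((pl.foldl (fun s v => s.insert v) (∅ : Std.HashSet Int)).size : Int)
        match PySem.List.max? c_list (fun v => v) with
        | none => ""  -- max([]) raises ValueError
        | some mx =>
          let min_m := if mx = 0 then n - 1 else n
          if m < min_m then "No"
          else if m > n + PySem.Int.floordiv (k * (k - 3)) 2 then "No"
          else res

-- ===== PORT B =====
-- first loop of Source B: relabel cb -> ca when a 0-edge joins two classes
def stepB1 (a_list b_list c_list : List Int) (st : Option (List Int)) (i : Int) :
    Option (List Int) :=
  match st with
  | none => none
  | some comp =>
    match PySem.List.pyGet? c_list i with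
    | none => none
    | some c =>
      if c = 0 then
        match PySem.List.pyGet? a_list i, PySem.List.pyGet? b_list i with
        | some a, some b =>
          match PySem.List.pyGet? comp a, PySem.List.pyGet? comp b with
          | some ca, some cb =>
            some (if ca = cb then comp else comp.map (fun v => if v = cb then ca else v))
          | _, _ => none
        | _, _ => none
      else some comp

-- second loop of Source B: 'if c_list[i] == 1 and comp[a_list[i]] == comp[b_list[i]]: res = "No"'
def stepB2 (a_list b_list c_list comp : List Int) (st : Option String) (i : Int) : Option String :=
  match st with
  | none => none
  | some res =>
    match PySem.List.pyGet? c_list i with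
    | none => none
    | some c =>
      if c = 1 then
        match PySem.List.pyGet? a_list i, PySem.List.pyGet? b_list i with
        | some a, some b =>
          match PySem.List.pyGet? comp a, PySem.List.pyGet? comp b with
          | some ca, some cb => some (if ca = cb then "No" else res)
          | _, _ => none
        | _, _ => none
      else some res

def is_graph_possible_alt (n : Int) (m : Int) (q : Int) (a_list : List Int) (b_list : List Int) (c_list : List Int) : String :=
  match (PySem.List.pyRange 0 q 1).foldl (stepB1 a_list b_list c_list)
      (some (PySem.List.pyRange 0 n 1)) with
  | none => ""
  | some comp =>
    match (PySem.List.pyRange 0 q 1).foldl (stepB2 a_list b_list c_list comp) (some "Yes") with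
    | none => ""
    | some res =>
      -- k = len(set(comp)): Python's set is a hash set
      let k : Int := ((comp.foldl (fun s v => s.insert v) (∅ : Std.HashSet Int)).size : Int)
      match PySem.List.max? c_list (fun v => v) with
      | none => ""
      | some mx =>
        let min_m := if mx = 0 then n - 1 else n
        if m < min_m then "No"
        else if m > n + PySem.Int.floordiv (k * (k - 3)) 2 then "No"
        else res

-- ===== PRECONDITION & SPEC =====
-- Pre_ is exactly the set of inputs on which the Python A returns normally: c_list must be
-- non-empty (max([]) raises ValueError), the first q entries of c_list must exist, and every
-- constraint edge (c in {0,1}) must carry existing endpoint entries whose values are valid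
-- Python indices into the length-n parent list (−n ≤ v < n; negative values wrap, as in Python).
def Pre_is_graph_possible (n : Int) (m : Int) (q : Int) (a_list : List Int) (b_list : List Int) (c_list : List Int) : Prop :=
  c_list ≠ [] ∧ q.toNat ≤ c_list.length ∧
  ∀ i : Nat, i < q.toNat →
    (c_list.getD i 0 = 0 ∨ c_list.getD i 0 = 1) →
      i < a_list.length ∧ i < b_list.length ∧
      -n ≤ a_list.getD i 0 ∧ a_list.getD i 0 < n ∧
      -n ≤ b_list.getD i 0 ∧ b_list.getD i 0 < n
instance (n : Int) (m : Int) (q : Int) (a_list : List Int) (b_list : List Int) (c_list : List Int) : Decidable (Pre_is_graph_possible n m q a_list b_list c_list) := by unfold Pre_is_graph_possible; infer_instance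

def pvWitness_is_graph_possible : Int × Int × Int × List Int × List Int × List Int :=
  (2, 1, 1, [0], [1], [0])

def Spec_is_graph_possible (n : Int) (m : Int) (q : Int) (a_list : List Int) (b_list : List Int) (c_list : List Int) (out : String) : Prop := out = is_graph_possible_alt n m q a_list b_list c_list
instance (n : Int) (m : Int) (q : Int) (a_list : List Int) (b_list : List Int) (c_list : List Int) (out : String) : Decidable (Spec_is_graph_possible n m q a_list b_list c_list out) := by unfold Spec_is_graph_possible; infer_instance

-- ===== CLAIM (what is proved, stated in full; the proofs are below) =====
def Claim_equal_is_graph_possible : Prop := ∀ (n : Int) (m : Int) (q : Int) (a_list : List Int) (b_list : List Int) (c_list : List Int), Dom_is_graph_possible n m q a_list b_list c_list → Pre_is_graph_possible n m q a_list b_list c_list → Spec_is_graph_possible n m q a_list b_list c_list (is_graph_possible n m q a_list b_list c_list)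

-- ===== LEMMAS AND PROOFS =====

-- List-level model of the port's union-find (same code over List Int); used only by the proofs.
def mFind : Nat → List Int → Int → Option (Int × List Int)
  | 0, _, _ => none
  | f+1, par, x =>
    match PySem.List.pyGet? par x with
    | none => none
    | some p =>
      if p = x then some (x, par)
      else
        match mFind f par p with
        | none => none
        | some rp =>
          match PySem.List.pySet? rp.2 x rp.1 with
          | none => none
          | some par2 => some (rp.1, par2)

def mUnion (par rank : List Int) (x y : Int) : Option (List Int × List Int) :=
  match mFind (par.length + 1) par x with
  | none => none
  | some (x', par1) =>
    match mFind (par1.length + 1) par1 y with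
    | none => none
    | some (y', par2) =>
      match PySem.List.pyGet? rank x', PySem.List.pyGet? rank y' with
      | some rx, some ry =>
        if rx < ry then
          match PySem.List.pySet? par2 x' y' with
          | none => none
          | some par3 => some (par3, rank)
        else
          match PySem.List.pySet? par2 y' x' with
          | none => none
          | some par3 =>
            if rx = ry then
              match PySem.List.pySet? rank x' (rx + 1) with
              | none => none
              | some rank2 => some (par3, rank2)
            else some (par3, rank)
      | _, _ => none

def mSame (par : List Int) (x y : Int) : Option (Bool × List Int) :=
  match mFind (par.length + 1) par x with
  | none => none
  | some (x', par1) =>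
    match mFind (par1.length + 1) par1 y with
    | none => none
    | some (y', par2) => some (decide (x' = y'), par2)

def mStep1 (a_list b_list c_list : List Int) (st : Option (List Int × List Int)) (i : Int) :
    Option (List Int × List Int) :=
  match st with
  | none => none
  | some (par, rank) =>
    match PySem.List.pyGet? c_list i with
    | none => none
    | some c =>
      if c = 0 then
        match PySem.List.pyGet? a_list i, PySem.List.pyGet? b_list i with
        | some a, some b => mUnion par rank a b
        | _, _ => none
      else some (par, rank)

def mStep2 (a_list b_list c_list : List Int) (st : Option (String × List Int)) (i : Int) :
    Option (String × List Int) :=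
  match st with
  | none => none
  | some (res, par) =>
    match PySem.List.pyGet? c_list i with
    | none => none
    | some c =>
      if c = 1 then
        match PySem.List.pyGet? a_list i, PySem.List.pyGet? b_list i with
        | some a, some b =>
          match mSame par a b with
          | none => none
          | some (s, par2) => some ((if s then "No" else res), par2)
        | _, _ => none
      else some (res, par)

def mStep3 (st : Option (List Int × List Int)) (i : Int) : Option (List Int × List Int) :=
  match st with
  | none => none
  | some (pl, par) =>
    match mFind (par.length + 1) par i with
    | none => none
    | some (r, par2) =>
      match PySem.List.pySet? pl i r with
      | none => none
      | some pl2 => some (pl2, par2)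


-- Python index wrap: the natural index accessed by par[x] for −len ≤ x < len
def pidx (len : Nat) (x : Int) : Nat := (if x < 0 then x + len else x).toNat

-- one parent step (0 for an out-of-range node; never used out of range)
def stp (par : List Int) (j : Nat) : Nat := (par.getD j 0).toNat

-- the root of j's parent chain, computed with fuel
def rt : Nat → List Int → Nat → Option Nat
  | 0, _, _ => none
  | f+1, par, j => if stp par j = j then some j else rt f par (stp par j)

def Ranged (par : List Int) : Prop :=
  ∀ j, j < par.length → 0 ≤ par.getD j 0 ∧ (par.getD j 0).toNat < par.length

def TermP (par : List Int) : Prop :=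
  ∀ j, j < par.length → ∃ f, (rt f par j).isSome

def rootN (par : List Int) (j : Nat) : Nat := (rt (par.length + 1) par j).getD j

-- --- index-wrap and list-update bookkeeping ---

theorem pyIdx?_inRange (n : Nat) (i : Int) (h1 : -(n:Int) ≤ i) (h2 : i < (n:Int)) :
    PySem.List.pyIdx? n i = some (pidx n i) := by
  simp only [PySem.List.pyIdx?, pidx]
  split_ifs <;> simp_all <;> omega

theorem pidx_lt (n : Nat) (i : Int) (h1 : -(n:Int) ≤ i) (h2 : i < (n:Int)) :
    pidx n i < n := by
  unfold pidx; split_ifs <;> omega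

theorem pidx_of_nonneg (n : Nat) (i : Int) (h : 0 ≤ i) : pidx n i = i.toNat := by
  unfold pidx; split_ifs <;> omega

theorem pyGet?_pidx (xs : List Int) (i : Int) (h1 : -(xs.length:Int) ≤ i) (h2 : i < (xs.length:Int)) :
    PySem.List.pyGet? xs i = some (xs.getD (pidx xs.length i) 0) := by
  have hlt := pidx_lt xs.length i h1 h2
  simp [PySem.List.pyGet?, pyIdx?_inRange _ _ h1 h2, List.getD_eq_getElem?_getD,
    List.getElem?_eq_getElem hlt]

theorem pySet?_pidx (xs : List Int) (i : Int) (v : Int) (h1 : -(xs.length:Int) ≤ i) (h2 : i < (xs.length:Int)) :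
    PySem.List.pySet? xs i v = some (xs.set (pidx xs.length i) v) := by
  simp [PySem.List.pySet?, pyIdx?_inRange _ _ h1 h2]

theorem getD_set' (l : List Int) (i j : Nat) (v : Int) :
    (l.set i v).getD j 0 = if j = i ∧ i < l.length then v else l.getD j 0 := by
  by_cases h : i = j
  · subst h
    by_cases hl : i < l.length <;>
      simp [List.getD_eq_getElem?_getD, List.getElem?_set, hl]
  · rw [List.getD_eq_getElem?_getD, List.getD_eq_getElem?_getD, List.getElem?_set, if_neg h,
      if_neg (fun hc => h hc.1.symm)]

theorem stp_set (l : List Int) (i : Nat) (v : Int) (j : Nat) :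
    stp (l.set i v) j = if j = i ∧ i < l.length then v.toNat else stp l j := by
  simp only [stp, getD_set']
  split_ifs <;> rfl

-- --- rt: basic facts ---

theorem rt_succ (f : Nat) (par : List Int) (j : Nat) :
    rt (f+1) par j = if stp par j = j then some j else rt f par (stp par j) := rfl

theorem rt_mono_succ (f : Nat) : ∀ (par : List Int) (j v : Nat),
    rt f par j = some v → rt (f+1) par j = some v := by
  induction f with
  | zero => intro par j v h; simp [rt] at h
  | succ f ih =>
    intro par j v h
    by_cases hs : stp par j = j
    · simpa [rt, hs] using h
    · simp only [rt_succ, if_neg hs] at h ⊢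
      exact ih par (stp par j) v h

theorem rt_mono {f g : Nat} (hfg : f ≤ g) (par : List Int) (j v : Nat)
    (h : rt f par j = some v) : rt g par j = some v := by
  induction g, hfg using Nat.le_induction with
  | base => exact h
  | succ g _ ih => exact rt_mono_succ g par j v ih

theorem rt_unique {f g : Nat} {par : List Int} {j v w : Nat}
    (h1 : rt f par j = some v) (h2 : rt g par j = some w) : v = w := by
  rcases le_total f g with h | h
  · have := rt_mono h par j v h1; rw [this] at h2; exact (Option.some_inj.mp h2)
  · have := rt_mono h par j w h2; rw [this] at h1; exact (Option.some_inj.mp h1).symm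

theorem rt_root (f : Nat) : ∀ (par : List Int) (j v : Nat),
    rt f par j = some v → stp par v = v := by
  induction f with
  | zero => intro par j v h; simp [rt] at h
  | succ f ih =>
    intro par j v h
    by_cases hs : stp par j = j
    · simp only [rt_succ, if_pos hs] at h
      obtain rfl := Option.some_inj.mp h; exact hs
    · simp only [rt_succ, if_neg hs] at h
      exact ih par (stp par j) v h

theorem rt_lt {par : List Int} (hR : Ranged par) (f : Nat) : ∀ (j v : Nat), j < par.length →
    rt f par j = some v → v < par.length := by
  induction f with
  | zero => intro j v _ h; simp [rt] at h
  | succ f ih =>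
    intro j v hj h
    by_cases hs : stp par j = j
    · simp only [rt_succ, if_pos hs] at h
      obtain rfl := Option.some_inj.mp h; exact hj
    · simp only [rt_succ, if_neg hs] at h
      exact ih (stp par j) v ((hR j hj).2) h

theorem rt_exists_P (f : Nat) : ∀ (par : List Int) (j v : Nat), rt f par j = some v →
    ∃ d, stp par ((stp par)^[d] j) = (stp par)^[d] j := by
  induction f with
  | zero => intro par j v h; simp [rt] at h
  | succ f ih =>
    intro par j v h
    by_cases hs : stp par j = j
    · exact ⟨0, by simpa using hs⟩
    · simp only [rt_succ, if_neg hs] at h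
      obtain ⟨d, hd⟩ := ih par (stp par j) v h
      exact ⟨d + 1, by simpa [Function.iterate_succ_apply] using hd⟩

theorem rt_isSome_of_P (par : List Int) : ∀ (d j : Nat),
    stp par ((stp par)^[d] j) = (stp par)^[d] j → (rt (d+1) par j).isSome := by
  intro d
  induction d with
  | zero => intro j h; simp at h; simp [rt, h]
  | succ d ih =>
    intro j h
    by_cases hs : stp par j = j
    · simp [rt_succ, hs]
    · rw [rt_succ]; rw [if_neg hs]
      exact ih (stp par j) (by simpa [Function.iterate_succ_apply] using h)

theorem iter_lt {par : List Int} (hR : Ranged par) {j : Nat} (hj : j < par.length) :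
    ∀ d, (stp par)^[d] j < par.length := by
  intro d
  induction d with
  | zero => simpa using hj
  | succ d ih =>
    rw [Function.iterate_succ_apply']
    exact (hR _ ih).2

theorem rt_bound {par : List Int} (hR : Ranged par) {j : Nat} (hj : j < par.length)
    (hT : ∃ f, (rt f par j).isSome) : (rt par.length par j).isSome := by
  obtain ⟨f, hf⟩ := hT
  obtain ⟨v, hv⟩ := Option.isSome_iff_exists.mp hf
  have hex : ∃ d, stp par ((stp par)^[d] j) = (stp par)^[d] j := rt_exists_P f par j v hv
  classical
  set d₀ := Nat.find hex with hd₀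
  have hP : stp par ((stp par)^[d₀] j) = (stp par)^[d₀] j := Nat.find_spec hex
  have hshift : ∀ a b : Nat, (stp par)^[a + b] j = (stp par)^[a] ((stp par)^[b] j) :=
    fun a b => Function.iterate_add_apply _ a b j
  have hne : ∀ i i' : Nat, i < i' → i' ≤ d₀ → (stp par)^[i] j ≠ (stp par)^[i'] j := by
    intro i i' hii hi'd heq
    have key : (stp par)^[d₀ - (i' - i)] j = (stp par)^[d₀] j := by
      have e1 : d₀ - (i' - i) = (d₀ - i') + i := by omega
      have e2 : d₀ = (d₀ - i') + i' := by omega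
      rw [e1, hshift, heq, ← hshift, ← e2]
    have hPd : stp par ((stp par)^[d₀ - (i' - i)] j) = (stp par)^[d₀ - (i' - i)] j := by
      rw [key]; exact hP
    have : ¬ (d₀ - (i' - i)) < d₀ := fun hlt => Nat.find_min hex hlt hPd
    omega
  have hinj : Function.Injective
      (fun i : Fin (d₀ + 1) => (⟨(stp par)^[i.1] j, iter_lt hR hj i.1⟩ : Fin par.length)) := by
    intro i i' heq
    simp only [Fin.mk.injEq] at heq
    by_contra hne'
    rcases Nat.lt_or_ge i.1 i'.1 with hlt | hge
    · exact hne i.1 i'.1 hlt (Nat.lt_succ_iff.mp i'.2) heq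
    rcases Nat.lt_or_ge i'.1 i.1 with hlt | hge'
    · exact hne i'.1 i.1 hlt (Nat.lt_succ_iff.mp i.2) heq.symm
    · exact hne' (Fin.ext (by omega))
  have hcard : d₀ + 1 ≤ par.length := by
    have := Fintype.card_le_of_injective _ hinj
    simpa using this
  obtain ⟨w, hw⟩ := Option.isSome_iff_exists.mp (rt_isSome_of_P par d₀ j hP)
  exact Option.isSome_iff_exists.mpr
    ⟨w, rt_mono (show d₀ + 1 ≤ par.length by omega) par j w hw⟩

-- --- rootN: the canonical root ---

theorem rootN_spec {par : List Int} (hR : Ranged par) (hT : TermP par) {j : Nat}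
    (hj : j < par.length) : rt (par.length + 1) par j = some (rootN par j) := by
  have hb := rt_bound hR hj (hT j hj)
  obtain ⟨v, hv⟩ := Option.isSome_iff_exists.mp hb
  have h1 := rt_mono (Nat.le_succ _) par j v hv
  simp [rootN, h1]

theorem rootN_lt {par : List Int} (hR : Ranged par) (hT : TermP par) {j : Nat}
    (hj : j < par.length) : rootN par j < par.length :=
  rt_lt hR _ j _ hj (rootN_spec hR hT hj)

theorem rootN_root {par : List Int} (hR : Ranged par) (hT : TermP par) {j : Nat}
    (hj : j < par.length) : stp par (rootN par j) = rootN par j :=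
  rt_root _ par j _ (rootN_spec hR hT hj)

theorem rootN_of_root {par : List Int} {j : Nat} (h : stp par j = j) : rootN par j = j := by
  simp [rootN, rt_succ, h]

theorem rootN_stp {par : List Int} (hR : Ranged par) (hT : TermP par) {j : Nat}
    (hj : j < par.length) : rootN par (stp par j) = rootN par j := by
  by_cases h : stp par j = j
  · rw [h]
  · have hs := rootN_spec hR hT hj
    rw [rt_succ, if_neg h] at hs
    have := rt_mono (Nat.le_succ _) par (stp par j) _ hs
    simp [rootN, this]

theorem rootN_idem {par : List Int} (hR : Ranged par) (hT : TermP par) {j : Nat}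
    (hj : j < par.length) : rootN par (rootN par j) = rootN par j :=
  rootN_of_root (rootN_root hR hT hj)

-- --- effect of the two kinds of parent updates ---

-- path compression: writing j's root into par[jx] preserves every rt result
theorem rt_set_root (par : List Int) (jx w : Nat) (fw : Nat) (hw : rt fw par jx = some w) :
    ∀ f j v, rt f par j = some v → ∃ f' ≤ f, rt f' (par.set jx ((w : Nat) : Int)) j = some v := by
  intro f
  induction f with
  | zero => intro j v h; simp [rt] at h
  | succ f ih =>
    intro j v h
    by_cases hlen : jx < par.length
    · by_cases hj : j = jx
      · subst hj
        obtain rfl : v = w := rt_unique h hw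
        by_cases hroot : stp par j = j
        · have hvj : j = v := by simpa [rt_succ, hroot] using h
          refine ⟨1, by omega, ?_⟩
          simp [rt, stp_set, hlen, ← hvj]
        · have hwroot : stp par v = v := rt_root fw par j v hw
          have hwne : v ≠ j := fun e => hroot (e ▸ hwroot)
          have hf2 : 2 ≤ f + 1 := by
            rw [rt_succ, if_neg hroot] at h
            cases f with
            | zero => simp [rt] at h
            | succ f => omega
          refine ⟨2, hf2, ?_⟩
          have h1 : stp (par.set j ((v : Nat) : Int)) j = v := by
            simp [stp_set, hlen]
          have h2 : stp (par.set j ((v : Nat) : Int)) v = v := by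
            simp [stp_set, hwne, hwroot]
          rw [rt_succ, h1, if_neg hwne, rt_succ, if_pos h2]
      · have hst : stp (par.set jx ((w : Nat) : Int)) j = stp par j := by
          simp [stp_set, hj]
        by_cases hroot : stp par j = j
        · have hvj : j = v := by simpa [rt_succ, hroot] using h
          exact ⟨1, by omega, by subst hvj; simp [rt, hst, hroot]⟩
        · rw [rt_succ, if_neg hroot] at h
          obtain ⟨f', hf', h'⟩ := ih (stp par j) v h
          exact ⟨f' + 1, by omega, by rw [rt_succ, hst, if_neg hroot]; exact h'⟩
    · rw [List.set_eq_of_length_le (by omega)]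
      exact ⟨f + 1, le_refl _, h⟩

-- union: writing root rx into par[ry] merges ry's class into rx's
theorem rt_set_merge (par : List Int) (rx ry : Nat) (hrx : stp par rx = rx)
    (hry : stp par ry = ry) (hne : rx ≠ ry) (hryl : ry < par.length) :
    ∀ f j v, rt f par j = some v →
      rt (f + 1) (par.set ry ((rx : Nat) : Int)) j = some (if v = ry then rx else v) := by
  intro f
  induction f with
  | zero => intro j v h; simp [rt] at h
  | succ f ih =>
    intro j v h
    by_cases hroot : stp par j = j
    · have hvj : j = v := by simpa [rt_succ, hroot] using h
      subst hvj
      by_cases hj : j = ry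
      · subst hj
        have h1 : stp (par.set j ((rx : Nat) : Int)) j = rx := by
          simp [stp_set, hryl]
        have h2 : stp (par.set j ((rx : Nat) : Int)) rx = rx := by
          simp [stp_set, hne, hrx]
        rw [rt_succ, h1, if_neg hne, rt_succ, if_pos h2]
        simp
      · have h1 : stp (par.set ry ((rx : Nat) : Int)) j = stp par j := by
          simp [stp_set, hj]
        rw [rt_succ, h1, if_pos hroot]
        simp [hj]
    · have hjne : j ≠ ry := fun e => hroot (by rw [e]; exact hry)
      rw [rt_succ, if_neg hroot] at h
      have h' := ih (stp par j) v h
      have h1 : stp (par.set ry ((rx : Nat) : Int)) j = stp par j := by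
        simp [stp_set, hjne]
      rw [rt_succ, h1, if_neg hroot]
      exact h'

theorem good_set_root {par : List Int} (hR : Ranged par) (hT : TermP par) {jx : Nat}
    (hjx : jx < par.length) (par' : List Int)
    (hp : par' = par.set jx ((rootN par jx : Nat) : Int)) :
    Ranged par' ∧ TermP par' ∧ par'.length = par.length ∧
      ∀ j, j < par.length → rootN par' j = rootN par j := by
  have hwlt := rootN_lt hR hT hjx
  have hspec := rootN_spec hR hT hjx
  have hlen : par'.length = par.length := by rw [hp, List.length_set]
  have hRan : Ranged par' := by
    intro j hj
    rw [hlen] at hj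
    rw [hp, getD_set']
    split_ifs with hc
    · constructor
      · positivity
      · simpa [hlen, hp] using hwlt
    · simpa [hlen, hp] using hR j hj
  have hpres : ∀ j, j < par.length → ∃ f' ≤ par.length + 1, rt f' par' j = some (rootN par j) := by
    intro j hj
    obtain ⟨f', hf', h'⟩ := rt_set_root par jx (rootN par jx) _ hspec _ j _ (rootN_spec hR hT hj)
    exact ⟨f', hf', by rw [hp]; exact h'⟩
  have hTerm : TermP par' := by
    intro j hj
    rw [hlen] at hj
    obtain ⟨f', _, h'⟩ := hpres j hj
    exact ⟨f', by simp [h']⟩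
  refine ⟨hRan, hTerm, hlen, ?_⟩
  intro j hj
  obtain ⟨f', hf', h'⟩ := hpres j hj
  have hm := rt_mono (show f' ≤ par'.length + 1 by omega) par' j _ h'
  simp [rootN, hm]

theorem good_set_merge {par : List Int} (hR : Ranged par) (hT : TermP par) {rx ry : Nat}
    (hrx : stp par rx = rx) (hry : stp par ry = ry) (hne : rx ≠ ry)
    (hrxl : rx < par.length) (hryl : ry < par.length) (par' : List Int)
    (hp : par' = par.set ry ((rx : Nat) : Int)) :
    Ranged par' ∧ TermP par' ∧ par'.length = par.length ∧
      ∀ j, j < par.length → rootN par' j = if rootN par j = ry then rx else rootN par j := by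
  have hlen : par'.length = par.length := by rw [hp, List.length_set]
  have hRan : Ranged par' := by
    intro j hj
    rw [hlen] at hj
    rw [hp, getD_set']
    split_ifs with hc
    · exact ⟨by positivity, by simpa [hlen, hp] using hrxl⟩
    · simpa [hlen, hp] using hR j hj
  have hpres : ∀ j, j < par.length →
      rt (par.length + 2) par' j = some (if rootN par j = ry then rx else rootN par j) := by
    intro j hj
    have := rt_set_merge par rx ry hrx hry hne hryl _ j _ (rootN_spec hR hT hj)
    rw [← hp] at this
    exact this
  have hTerm : TermP par' := by
    intro j hj
    rw [hlen] at hj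
    exact ⟨par.length + 2, by simp [hpres j hj]⟩
  refine ⟨hRan, hTerm, hlen, ?_⟩
  intro j hj
  have hb : (rt par'.length par' j).isSome :=
    rt_bound hRan (by omega) ⟨par.length + 2, by simp [hpres j hj]⟩
  obtain ⟨v', hv'⟩ := Option.isSome_iff_exists.mp hb
  have heq : v' = if rootN par j = ry then rx else rootN par j := rt_unique hv' (hpres j hj)
  have hm := rt_mono (Nat.le_succ _) par' j v' hv'
  simp [rootN, hm, heq]

-- --- specification of the ported union-find operations ---

theorem ufFind_spec : ∀ (f : Nat) (par : List Int) (x : Int),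
    Ranged par → TermP par → -(par.length:Int) ≤ x → x < (par.length:Int) →
    (rt (if x < 0 then f - 1 else f) par (pidx par.length x)).isSome →
    ∃ par', mFind f par x = some (((rootN par (pidx par.length x) : Nat) : Int), par')
      ∧ par'.length = par.length ∧ Ranged par' ∧ TermP par'
      ∧ ∀ j, j < par.length → rootN par' j = rootN par j := by
  intro f
  induction f with
  | zero =>
    intro par x _ _ _ _ hfuel
    split at hfuel <;> simp [rt] at hfuel
  | succ f ih =>
    intro par x hR hT h1 h2 hfuel
    have hjlt : pidx par.length x < par.length := pidx_lt _ _ h1 h2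
    have hget := pyGet?_pidx par x h1 h2
    have hp0 : 0 ≤ par.getD (pidx par.length x) 0 := (hR _ hjlt).1
    have hpstp : par.getD (pidx par.length x) 0 = ((stp par (pidx par.length x) : Nat) : Int) :=
      (Int.toNat_of_nonneg hp0).symm
    by_cases hpx : par.getD (pidx par.length x) 0 = x
    · have hx0 : 0 ≤ x := hpx ▸ hp0
      have hjeq : ((pidx par.length x : Nat) : Int) = x := by
        simp [pidx, not_lt.mpr hx0, Int.toNat_of_nonneg hx0]
      have hroot : stp par (pidx par.length x) = pidx par.length x := by
        have hpe : par.getD (pidx par.length x) 0 = ((pidx par.length x : Nat) : Int) :=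
          hpx.trans hjeq.symm
        unfold stp
        rw [hpe]
        omega
      have hrN : rootN par (pidx par.length x) = pidx par.length x := rootN_of_root hroot
      refine ⟨par, ?_, rfl, hR, hT, fun j _ => rfl⟩
      rw [hrN, hjeq]
      unfold mFind
      rw [hget]
      dsimp only
      rw [if_pos hpx]
    · have hstp_lt : stp par (pidx par.length x) < par.length := (hR _ hjlt).2
      have hpidxp : pidx par.length (par.getD (pidx par.length x) 0) = stp par (pidx par.length x) :=
        pidx_of_nonneg _ _ hp0
      have hple : -(par.length:Int) ≤ par.getD (pidx par.length x) 0 := by omega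
      have hplt : par.getD (pidx par.length x) 0 < (par.length : Int) := by
        rw [hpstp]; exact_mod_cast hstp_lt
      have hfuel' : (rt (if par.getD (pidx par.length x) 0 < 0 then f - 1 else f) par
          (pidx par.length (par.getD (pidx par.length x) 0))).isSome := by
        rw [if_neg (not_lt.mpr hp0), hpidxp]
        by_cases hx0 : x < 0
        · rw [if_pos hx0, Nat.add_sub_cancel] at hfuel
          by_cases hroot : stp par (pidx par.length x) = pidx par.length x
          · rw [hroot]; exact hfuel
          · obtain ⟨v, hv⟩ := Option.isSome_iff_exists.mp hfuel
            cases f with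
            | zero => simp [rt] at hv
            | succ g =>
              rw [rt_succ, if_neg hroot] at hv
              exact Option.isSome_iff_exists.mpr ⟨v, rt_mono (Nat.le_succ g) _ _ _ hv⟩
        · rw [if_neg hx0] at hfuel
          have hroot : stp par (pidx par.length x) ≠ pidx par.length x := by
            intro he
            apply hpx
            rw [hpstp, he]
            simp [pidx, hx0, Int.toNat_of_nonneg (not_lt.mp hx0)]
          obtain ⟨v, hv⟩ := Option.isSome_iff_exists.mp hfuel
          rw [rt_succ, if_neg hroot] at hv
          exact Option.isSome_iff_exists.mpr ⟨v, hv⟩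
      obtain ⟨par1, hfind1, hlen1, hR1, hT1, hroots1⟩ :=
        ih par (par.getD (pidx par.length x) 0) hR hT hple hplt hfuel'
      have hr1 : rootN par (pidx par.length (par.getD (pidx par.length x) 0)) =
          rootN par (pidx par.length x) := by
        rw [hpidxp]; exact rootN_stp hR hT hjlt
      rw [hr1] at hfind1
      have hrootN1 : rootN par1 (pidx par.length x) = rootN par (pidx par.length x) :=
        hroots1 _ hjlt
      have hset : PySem.List.pySet? par1 x ((rootN par (pidx par.length x) : Nat) : Int) =
          some (par1.set (pidx par.length x) ((rootN par (pidx par.length x) : Nat) : Int)) := by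
        rw [pySet?_pidx par1 x _ (by rw [hlen1]; exact h1) (by rw [hlen1]; exact h2), hlen1]
      obtain ⟨hR2, hT2, hlen2, hroots2⟩ :=
        good_set_root hR1 hT1 (show pidx par.length x < par1.length by rw [hlen1]; exact hjlt)
          (par1.set (pidx par.length x) ((rootN par (pidx par.length x) : Nat) : Int))
          (by rw [hrootN1])
      refine ⟨par1.set (pidx par.length x) ((rootN par (pidx par.length x) : Nat) : Int), ?_,
        by rw [List.length_set, hlen1], hR2, hT2, ?_⟩
      · unfold mFind
        rw [hget]
        dsimp only
        rw [if_neg hpx, hfind1]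
        dsimp only
        rw [hset]
      · intro j hj
        rw [hroots2 j (by rw [hlen1]; exact hj), hroots1 j hj]

theorem ufFind_ok {par : List Int} (hR : Ranged par) (hT : TermP par) {x : Int}
    (h1 : -(par.length:Int) ≤ x) (h2 : x < (par.length:Int)) :
    ∃ par', mFind (par.length + 1) par x = some (((rootN par (pidx par.length x) : Nat) : Int), par')
      ∧ par'.length = par.length ∧ Ranged par' ∧ TermP par'
      ∧ ∀ j, j < par.length → rootN par' j = rootN par j := by
  apply ufFind_spec (par.length + 1) par x hR hT h1 h2
  have hjlt : pidx par.length x < par.length := pidx_lt _ _ h1 h2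
  have hb := rt_bound hR hjlt (hT _ hjlt)
  obtain ⟨v, hv⟩ := Option.isSome_iff_exists.mp hb
  split
  · rw [Nat.add_sub_cancel]
    exact Option.isSome_iff_exists.mpr ⟨v, hv⟩
  · exact Option.isSome_iff_exists.mpr ⟨v, rt_mono (by omega) _ _ _ hv⟩

theorem ufSame_ok {par : List Int} (hR : Ranged par) (hT : TermP par) {x y : Int}
    (hx1 : -(par.length:Int) ≤ x) (hx2 : x < (par.length:Int))
    (hy1 : -(par.length:Int) ≤ y) (hy2 : y < (par.length:Int)) :
    ∃ par', mSame par x y =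
        some (decide (rootN par (pidx par.length x) = rootN par (pidx par.length y)), par')
      ∧ par'.length = par.length ∧ Ranged par' ∧ TermP par'
      ∧ ∀ j, j < par.length → rootN par' j = rootN par j := by
  obtain ⟨par1, hf1, hlen1, hR1, hT1, hroots1⟩ := ufFind_ok hR hT hx1 hx2
  obtain ⟨par2, hf2, hlen2, hR2, hT2, hroots2⟩ :=
    ufFind_ok hR1 hT1 (x := y) (by rw [hlen1]; exact hy1) (by rw [hlen1]; exact hy2)
  have hv2 : rootN par1 (pidx par1.length y) = rootN par (pidx par.length y) := by
    rw [hlen1]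
    exact hroots1 _ (pidx_lt _ _ hy1 hy2)
  rw [hv2] at hf2
  refine ⟨par2, ?_, by rw [hlen2, hlen1], fun j hj => hR2 j hj, hT2, ?_⟩
  · rw [mSame, hf1]
    dsimp only
    rw [hf2]
    simp
  · intro j hj
    rw [hroots2 j (by rw [hlen1]; exact hj), hroots1 j hj]

theorem ufUnion_ok {par rank : List Int} (hR : Ranged par) (hT : TermP par)
    (hrk : rank.length = par.length) {x y : Int}
    (hx1 : -(par.length:Int) ≤ x) (hx2 : x < (par.length:Int))
    (hy1 : -(par.length:Int) ≤ y) (hy2 : y < (par.length:Int)) :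
    ∃ par' rank', mUnion par rank x y = some (par', rank') ∧ par'.length = par.length ∧
      rank'.length = par.length ∧ Ranged par' ∧ TermP par' ∧
      ∃ u v : Nat,
        ((u = rootN par (pidx par.length x) ∧ v = rootN par (pidx par.length y)) ∨
         (u = rootN par (pidx par.length y) ∧ v = rootN par (pidx par.length x))) ∧
        ∀ j, j < par.length → rootN par' j = if rootN par j = v then u else rootN par j := by
  obtain ⟨par1, hf1, hlen1, hR1, hT1, hroots1⟩ := ufFind_ok hR hT hx1 hx2
  obtain ⟨par2, hf2, hlen2, hR2, hT2, hroots2⟩ :=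
    ufFind_ok hR1 hT1 (x := y) (by rw [hlen1]; exact hy1) (by rw [hlen1]; exact hy2)
  have hv2 : rootN par1 (pidx par1.length y) = rootN par (pidx par.length y) := by
    rw [hlen1]
    exact hroots1 _ (pidx_lt _ _ hy1 hy2)
  rw [hv2] at hf2
  have hlen21 : par2.length = par.length := by rw [hlen2, hlen1]
  have hroots21 : ∀ j, j < par.length → rootN par2 j = rootN par j := by
    intro j hj
    rw [hroots2 j (by rw [hlen1]; exact hj), hroots1 j hj]
  set rx := rootN par (pidx par.length x) with hrx
  set ry := rootN par (pidx par.length y) with hry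
  have hrxlt : rx < par.length := rootN_lt hR hT (pidx_lt _ _ hx1 hx2)
  have hrylt : ry < par.length := rootN_lt hR hT (pidx_lt _ _ hy1 hy2)
  have hrxroot2 : stp par2 rx = rx := by
    have h1 : rootN par2 rx = rx := by
      rw [hroots21 rx hrxlt]
      exact rootN_idem hR hT (pidx_lt _ _ hx1 hx2)
    have := rootN_root hR2 hT2 (show rx < par2.length by rw [hlen21]; exact hrxlt)
    rw [h1] at this
    exact this
  have hryroot2 : stp par2 ry = ry := by
    have h1 : rootN par2 ry = ry := by
      rw [hroots21 ry hrylt]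
      exact rootN_idem hR hT (pidx_lt _ _ hy1 hy2)
    have := rootN_root hR2 hT2 (show ry < par2.length by rw [hlen21]; exact hrylt)
    rw [h1] at this
    exact this
  have hgetrx : PySem.List.pyGet? rank ((rx : Nat) : Int) =
      some (rank.getD rx 0) := by
    have := pyGet?_pidx rank ((rx : Nat) : Int) (by omega) (by rw [hrk]; exact_mod_cast hrxlt)
    rwa [pidx_of_nonneg _ _ (by positivity), Int.toNat_natCast] at this
  have hgetry : PySem.List.pyGet? rank ((ry : Nat) : Int) =
      some (rank.getD ry 0) := by
    have := pyGet?_pidx rank ((ry : Nat) : Int) (by omega) (by rw [hrk]; exact_mod_cast hrylt)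
    rwa [pidx_of_nonneg _ _ (by positivity), Int.toNat_natCast] at this
  have hsetx : PySem.List.pySet? par2 ((rx : Nat) : Int) ((ry : Nat) : Int) =
      some (par2.set rx ((ry : Nat) : Int)) := by
    have := pySet?_pidx par2 ((rx : Nat) : Int) ((ry : Nat) : Int)
      (by omega) (by rw [hlen21]; exact_mod_cast hrxlt)
    rwa [pidx_of_nonneg _ _ (by positivity), Int.toNat_natCast] at this
  have hsety : PySem.List.pySet? par2 ((ry : Nat) : Int) ((rx : Nat) : Int) =
      some (par2.set ry ((rx : Nat) : Int)) := by
    have := pySet?_pidx par2 ((ry : Nat) : Int) ((rx : Nat) : Int)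
      (by omega) (by rw [hlen21]; exact_mod_cast hrylt)
    rwa [pidx_of_nonneg _ _ (by positivity), Int.toNat_natCast] at this
  by_cases hlt : rank.getD rx 0 < rank.getD ry 0
  · -- par2[rx] := ry  (merge rx's class into ry's)
    have hne : ry ≠ rx := by
      intro he; rw [he] at hlt; omega
    obtain ⟨hR3, hT3, hlen3, hroots3⟩ := good_set_merge hR2 hT2 hryroot2 hrxroot2 hne
      (by rw [hlen21]; exact hrylt) (by rw [hlen21]; exact hrxlt)
      (par2.set rx ((ry : Nat) : Int)) rfl
    refine ⟨par2.set rx ((ry : Nat) : Int), rank, ?_, by rw [List.length_set, hlen21], hrk,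
      hR3, hT3, ry, rx, Or.inr ⟨rfl, rfl⟩, ?_⟩
    · rw [mUnion, hf1]
      dsimp only
      rw [hf2]
      dsimp only
      rw [hgetrx, hgetry]
      dsimp only
      rw [if_pos hlt, hsetx]
    · intro j hj
      rw [hroots3 j (by rw [hlen21]; exact hj), hroots21 j hj]
  · by_cases heq : rx = ry
    · -- x and y already share a root: par2[ry] := rx is writing ry's own root
      have hry2 : rootN par2 ry = rx := by
        rw [hroots21 ry hrylt, ← heq]
        rw [hrx]
        exact rootN_idem hR hT (pidx_lt _ _ hx1 hx2)
      obtain ⟨hR3, hT3, hlen3, hroots3⟩ := good_set_root hR2 hT2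
        (show ry < par2.length by rw [hlen21]; exact hrylt)
        (par2.set ry ((rx : Nat) : Int)) (by rw [hry2])
      have htail : ∀ j, j < par.length →
          rootN (par2.set ry ((rx : Nat) : Int)) j = if rootN par j = ry then rx else rootN par j := by
        intro j hj
        rw [hroots3 j (by rw [hlen21]; exact hj), hroots21 j hj]
        split_ifs with hc
        · rw [hc, heq]
        · rfl
      by_cases hreq : rank.getD rx 0 = rank.getD ry 0
      · refine ⟨par2.set ry ((rx : Nat) : Int),
          rank.set rx (rank.getD rx 0 + 1), ?_, by rw [List.length_set, hlen21],
          by rw [List.length_set]; exact hrk, hR3, hT3, rx, ry, Or.inl ⟨rfl, rfl⟩, htail⟩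
        rw [mUnion, hf1]
        dsimp only
        rw [hf2]
        dsimp only
        rw [hgetrx, hgetry]
        dsimp only
        rw [if_neg hlt, hsety]
        dsimp only
        rw [if_pos hreq]
        have hsetr : PySem.List.pySet? rank ((rx : Nat) : Int) (rank.getD rx 0 + 1) =
            some (rank.set rx (rank.getD rx 0 + 1)) := by
          have := pySet?_pidx rank ((rx : Nat) : Int) (rank.getD rx 0 + 1)
            (by omega) (by rw [hrk]; exact_mod_cast hrxlt)
          rwa [pidx_of_nonneg _ _ (by positivity), Int.toNat_natCast] at this
        rw [hsetr]
      · refine ⟨par2.set ry ((rx : Nat) : Int), rank, ?_, by rw [List.length_set, hlen21],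
          hrk, hR3, hT3, rx, ry, Or.inl ⟨rfl, rfl⟩, htail⟩
        rw [mUnion, hf1]
        dsimp only
        rw [hf2]
        dsimp only
        rw [hgetrx, hgetry]
        dsimp only
        rw [if_neg hlt, hsety]
        dsimp only
        rw [if_neg hreq]
    · -- par2[ry] := rx  (merge ry's class into rx's)
      obtain ⟨hR3, hT3, hlen3, hroots3⟩ := good_set_merge hR2 hT2 hrxroot2 hryroot2 heq
        (by rw [hlen21]; exact hrxlt) (by rw [hlen21]; exact hrylt)
        (par2.set ry ((rx : Nat) : Int)) rfl
      have htail : ∀ j, j < par.length →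
          rootN (par2.set ry ((rx : Nat) : Int)) j = if rootN par j = ry then rx else rootN par j := by
        intro j hj
        rw [hroots3 j (by rw [hlen21]; exact hj), hroots21 j hj]
      by_cases hreq : rank.getD rx 0 = rank.getD ry 0
      · refine ⟨par2.set ry ((rx : Nat) : Int),
          rank.set rx (rank.getD rx 0 + 1), ?_, by rw [List.length_set, hlen21],
          by rw [List.length_set]; exact hrk, hR3, hT3, rx, ry, Or.inl ⟨rfl, rfl⟩, htail⟩
        rw [mUnion, hf1]
        dsimp only
        rw [hf2]
        dsimp only
        rw [hgetrx, hgetry]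
        dsimp only
        rw [if_neg hlt, hsety]
        dsimp only
        rw [if_pos hreq]
        have hsetr : PySem.List.pySet? rank ((rx : Nat) : Int) (rank.getD rx 0 + 1) =
            some (rank.set rx (rank.getD rx 0 + 1)) := by
          have := pySet?_pidx rank ((rx : Nat) : Int) (rank.getD rx 0 + 1)
            (by omega) (by rw [hrk]; exact_mod_cast hrxlt)
          rwa [pidx_of_nonneg _ _ (by positivity), Int.toNat_natCast] at this
        rw [hsetr]
      · refine ⟨par2.set ry ((rx : Nat) : Int), rank, ?_, by rw [List.length_set, hlen21],
          hrk, hR3, hT3, rx, ry, Or.inl ⟨rfl, rfl⟩, htail⟩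
        rw [mUnion, hf1]
        dsimp only
        rw [hf2]
        dsimp only
        rw [hgetrx, hgetry]
        dsimp only
        rw [if_neg hlt, hsety]
        dsimp only
        rw [if_neg hreq]

-- --- lockstep simulation: A's union-find state vs B's label list ---

-- what Pre_ guarantees about edge i
def EdgeOK (n : Int) (a_list b_list c_list : List Int) (i : Int) : Prop :=
  ∃ c, PySem.List.pyGet? c_list i = some c ∧
    ((c = 0 ∨ c = 1) → ∃ a b, PySem.List.pyGet? a_list i = some a ∧
      PySem.List.pyGet? b_list i = some b ∧ -n ≤ a ∧ a < n ∧ -n ≤ b ∧ b < n)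

-- A's parent array and B's label list induce the same partition of the N nodes
def InvAB (N : Nat) (comp par rank : List Int) : Prop :=
  par.length = N ∧ rank.length = N ∧ comp.length = N ∧ Ranged par ∧ TermP par ∧
  ∀ j k, j < N → k < N → (rootN par j = rootN par k ↔ comp.getD j 0 = comp.getD k 0)

theorem getD_map_lt (l : List Int) (F : Int → Int) {j : Nat} (hj : j < l.length) :
    (l.map F).getD j 0 = F (l.getD j 0) := by
  simp [List.getD_eq_getElem?_getD, List.getElem?_eq_getElem hj]

theorem step1_ok {n : Int} {a_list b_list c_list : List Int} {N : Nat}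
    (hbound : ∀ v : Int, -n ≤ v → v < n → -(N:Int) ≤ v ∧ v < (N:Int))
    (i : Int) (hE : EdgeOK n a_list b_list c_list i)
    {par rank comp : List Int} (hI : InvAB N comp par rank) :
    ∃ par' rank' comp',
      mStep1 a_list b_list c_list (some (par, rank)) i = some (par', rank') ∧
      stepB1 a_list b_list c_list (some comp) i = some comp' ∧
      InvAB N comp' par' rank' := by
  obtain ⟨hpl, hrl, hcl, hR, hT, hiff⟩ := hI
  obtain ⟨c, hc, hrest⟩ := hE
  by_cases hc0 : c = 0
  · obtain ⟨a, b, ha, hb, ha1, ha2, hb1, hb2⟩ := hrest (Or.inl hc0)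
    obtain ⟨hA1, hA2⟩ := hbound a ha1 ha2
    obtain ⟨hB1, hB2⟩ := hbound b hb1 hb2
    have hax1 : -(par.length:Int) ≤ a := by rw [hpl]; exact hA1
    have hax2 : a < (par.length:Int) := by rw [hpl]; exact hA2
    have hbx1 : -(par.length:Int) ≤ b := by rw [hpl]; exact hB1
    have hbx2 : b < (par.length:Int) := by rw [hpl]; exact hB2
    have hja : pidx par.length a = pidx N a := by rw [hpl]
    have hjb : pidx par.length b = pidx N b := by rw [hpl]
    have hjalt : pidx N a < N := by rw [← hpl]; exact pidx_lt _ _ hax1 hax2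
    have hjblt : pidx N b < N := by rw [← hpl]; exact pidx_lt _ _ hbx1 hbx2
    have hga : PySem.List.pyGet? comp a = some (comp.getD (pidx N a) 0) := by
      have := pyGet?_pidx comp a (by rw [hcl]; exact hA1) (by rw [hcl]; exact hA2)
      rwa [hcl] at this
    have hgb : PySem.List.pyGet? comp b = some (comp.getD (pidx N b) 0) := by
      have := pyGet?_pidx comp b (by rw [hcl]; exact hB1) (by rw [hcl]; exact hB2)
      rwa [hcl] at this
    obtain ⟨par', rank', hu, hlenp, hlenr, hR', hT', u, v, huv, hroots'⟩ :=
      ufUnion_ok hR hT (by rw [hrl, hpl]) hax1 hax2 hbx1 hbx2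
    rw [hja, hjb] at huv
    have hiffab := hiff (pidx N a) (pidx N b) hjalt hjblt
    by_cases hcc : comp.getD (pidx N a) 0 = comp.getD (pidx N b) 0
    · -- endpoints already share a class: B keeps comp, A's union keeps the partition
      have hreq : rootN par (pidx N a) = rootN par (pidx N b) := hiffab.mpr hcc
      have huveq : u = v := by rcases huv with ⟨rfl, rfl⟩ | ⟨rfl, rfl⟩ <;> omega
      refine ⟨par', rank', comp, ?_, ?_, by rw [hlenp]; exact hpl, by rw [hlenr]; exact hpl,
        hcl, hR', hT', ?_⟩
      · rw [mStep1, hc]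
        dsimp only
        rw [if_pos hc0, ha, hb]
        dsimp only
        exact hu
      · rw [stepB1, hc]
        dsimp only
        rw [if_pos hc0, ha, hb]
        dsimp only
        rw [hga, hgb]
        dsimp only
        rw [if_pos hcc]
      · intro j k hj hk
        have hrj := hroots' j (by rw [hpl]; exact hj)
        have hrk := hroots' k (by rw [hpl]; exact hk)
        rw [hrj, hrk]
        subst huveq
        have e1 : (if rootN par j = u then u else rootN par j) = rootN par j := by
          split_ifs with h <;> omega
        have e2 : (if rootN par k = u then u else rootN par k) = rootN par k := by
          split_ifs with h <;> omega
        rw [e1, e2]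
        exact hiff j k hj hk
    · -- distinct classes: A merges the two trees, B relabels cb into ca
      have hrne : rootN par (pidx N a) ≠ rootN par (pidx N b) := fun h => hcc (hiffab.mp h)
      refine ⟨par', rank',
        comp.map (fun w => if w = comp.getD (pidx N b) 0 then comp.getD (pidx N a) 0 else w),
        ?_, ?_, by rw [hlenp]; exact hpl, by rw [hlenr]; exact hpl,
        by rw [List.length_map]; exact hcl, hR', hT', ?_⟩
      · rw [mStep1, hc]
        dsimp only
        rw [if_pos hc0, ha, hb]
        dsimp only
        exact hu
      · rw [stepB1, hc]
        dsimp only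
        rw [if_pos hc0, ha, hb]
        dsimp only
        rw [hga, hgb]
        dsimp only
        rw [if_neg hcc]
      · intro j k hj hk
        have hrj := hroots' j (by rw [hpl]; exact hj)
        have hrk := hroots' k (by rw [hpl]; exact hk)
        rw [hrj, hrk, getD_map_lt _ _ (by rw [hcl]; exact hj), getD_map_lt _ _ (by rw [hcl]; exact hk)]
        have hjk := hiff j k hj hk
        have hj1 := hiff j (pidx N a) hj hjalt
        have hj2 := hiff j (pidx N b) hj hjblt
        have hk1 := hiff k (pidx N a) hk hjalt
        have hk2 := hiff k (pidx N b) hk hjblt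
        rcases huv with ⟨rfl, rfl⟩ | ⟨rfl, rfl⟩ <;> split_ifs <;> omega
  · have hcne0 : ¬ c = 0 := hc0
    refine ⟨par, rank, comp, ?_, ?_, hpl, hrl, hcl, hR, hT, hiff⟩
    · rw [mStep1, hc]
      dsimp only
      rw [if_neg hcne0]
    · rw [stepB1, hc]
      dsimp only
      rw [if_neg hcne0]

theorem phase1_run {n : Int} {a_list b_list c_list : List Int} {N : Nat}
    (hbound : ∀ v : Int, -n ≤ v → v < n → -(N:Int) ≤ v ∧ v < (N:Int)) :
    ∀ (l : List Int), (∀ i ∈ l, EdgeOK n a_list b_list c_list i) →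
    ∀ par rank comp, InvAB N comp par rank →
    ∃ par' rank' comp',
      l.foldl (mStep1 a_list b_list c_list) (some (par, rank)) = some (par', rank') ∧
      l.foldl (stepB1 a_list b_list c_list) (some comp) = some comp' ∧
      InvAB N comp' par' rank' := by
  intro l
  induction l with
  | nil => exact fun _ par rank comp hI => ⟨par, rank, comp, rfl, rfl, hI⟩
  | cons i l ih =>
    intro hE par rank comp hI
    obtain ⟨par1, rank1, comp1, hA, hB, hI1⟩ := step1_ok hbound i (hE i List.mem_cons_self) hI
    obtain ⟨par', rank', comp', hA', hB', hI'⟩ :=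
      ih (fun j hj => hE j (List.mem_cons_of_mem _ hj)) par1 rank1 comp1 hI1
    exact ⟨par', rank', comp',
      by rw [List.foldl_cons, hA]; exact hA',
      by rw [List.foldl_cons, hB]; exact hB', hI'⟩

-- the second loop only compresses paths: the partition (and comp) is fixed
def InvAB2 (N : Nat) (comp par : List Int) : Prop :=
  par.length = N ∧ Ranged par ∧ TermP par ∧
  ∀ j k, j < N → k < N → (rootN par j = rootN par k ↔ comp.getD j 0 = comp.getD k 0)

theorem step2_ok {n : Int} {a_list b_list c_list : List Int} {N : Nat}
    (hbound : ∀ v : Int, -n ≤ v → v < n → -(N:Int) ≤ v ∧ v < (N:Int))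
    {comp : List Int} (hcl : comp.length = N)
    (i : Int) (hE : EdgeOK n a_list b_list c_list i)
    {par : List Int} (hI : InvAB2 N comp par) (res : String) :
    ∃ res' par',
      mStep2 a_list b_list c_list (some (res, par)) i = some (res', par') ∧
      stepB2 a_list b_list c_list comp (some res) i = some res' ∧
      InvAB2 N comp par' := by
  obtain ⟨hpl, hR, hT, hiff⟩ := hI
  obtain ⟨c, hc, hrest⟩ := hE
  by_cases hc1 : c = 1
  · obtain ⟨a, b, ha, hb, ha1, ha2, hb1, hb2⟩ := hrest (Or.inr hc1)
    obtain ⟨hA1, hA2⟩ := hbound a ha1 ha2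
    obtain ⟨hB1, hB2⟩ := hbound b hb1 hb2
    have hax1 : -(par.length:Int) ≤ a := by rw [hpl]; exact hA1
    have hax2 : a < (par.length:Int) := by rw [hpl]; exact hA2
    have hbx1 : -(par.length:Int) ≤ b := by rw [hpl]; exact hB1
    have hbx2 : b < (par.length:Int) := by rw [hpl]; exact hB2
    have hjalt : pidx N a < N := by rw [← hpl]; exact pidx_lt _ _ hax1 hax2
    have hjblt : pidx N b < N := by rw [← hpl]; exact pidx_lt _ _ hbx1 hbx2
    have hga : PySem.List.pyGet? comp a = some (comp.getD (pidx N a) 0) := by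
      have := pyGet?_pidx comp a (by rw [hcl]; exact hA1) (by rw [hcl]; exact hA2)
      rwa [hcl] at this
    have hgb : PySem.List.pyGet? comp b = some (comp.getD (pidx N b) 0) := by
      have := pyGet?_pidx comp b (by rw [hcl]; exact hB1) (by rw [hcl]; exact hB2)
      rwa [hcl] at this
    obtain ⟨par', hsame, hlenp, hR', hT', hroots'⟩ := ufSame_ok hR hT hax1 hax2 hbx1 hbx2
    rw [show pidx par.length a = pidx N a by rw [hpl],
        show pidx par.length b = pidx N b by rw [hpl]] at hsame
    have hiffab := hiff (pidx N a) (pidx N b) hjalt hjblt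
    refine ⟨(if comp.getD (pidx N a) 0 = comp.getD (pidx N b) 0 then "No" else res), par', ?_, ?_,
      by rw [hlenp]; exact hpl, hR', hT', ?_⟩
    · rw [mStep2, hc]
      dsimp only
      rw [if_pos hc1, ha, hb]
      dsimp only
      rw [hsame]
      dsimp only
      by_cases hcc : comp.getD (pidx N a) 0 = comp.getD (pidx N b) 0
      · rw [if_pos hcc, if_pos (by rw [decide_eq_true_eq]; exact hiffab.mpr hcc)]
      · rw [if_neg hcc, if_neg (by rw [decide_eq_true_eq]; exact fun h => hcc (hiffab.mp h))]
    · rw [stepB2, hc]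
      dsimp only
      rw [if_pos hc1, ha, hb]
      dsimp only
      rw [hga, hgb]
    · intro j k hj hk
      rw [hroots' j (by rw [hpl]; exact hj), hroots' k (by rw [hpl]; exact hk)]
      exact hiff j k hj hk
  · refine ⟨res, par, ?_, ?_, hpl, hR, hT, hiff⟩
    · rw [mStep2, hc]
      dsimp only
      rw [if_neg hc1]
    · rw [stepB2, hc]
      dsimp only
      rw [if_neg hc1]

theorem phase2_run {n : Int} {a_list b_list c_list : List Int} {N : Nat}
    (hbound : ∀ v : Int, -n ≤ v → v < n → -(N:Int) ≤ v ∧ v < (N:Int))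
    {comp : List Int} (hcl : comp.length = N) :
    ∀ (l : List Int), (∀ i ∈ l, EdgeOK n a_list b_list c_list i) →
    ∀ par res, InvAB2 N comp par →
    ∃ res' par',
      l.foldl (mStep2 a_list b_list c_list) (some (res, par)) = some (res', par') ∧
      l.foldl (stepB2 a_list b_list c_list comp) (some res) = some res' ∧
      InvAB2 N comp par' := by
  intro l
  induction l with
  | nil => exact fun _ par res hI => ⟨res, par, rfl, rfl, hI⟩
  | cons i l ih =>
    intro hE par res hI
    obtain ⟨res1, par1, hA, hB, hI1⟩ := step2_ok hbound hcl i (hE i List.mem_cons_self) hI res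
    obtain ⟨res', par', hA', hB', hI'⟩ :=
      ih (fun j hj => hE j (List.mem_cons_of_mem _ hj)) par1 res1 hI1
    exact ⟨res', par',
      by rw [List.foldl_cons, hA]; exact hA',
      by rw [List.foldl_cons, hB]; exact hB', hI'⟩

-- the third loop collects the root of every node
theorem phase3_run {N : Nat} {par : List Int} (hpl : par.length = N) (hR : Ranged par)
    (hT : TermP par) :
    ∀ (t : Nat), t ≤ N →
    ∃ pl' par',
      (PySem.List.pyRange 0 (t:Int) 1).foldl mStep3 (some (List.replicate N (0:Int), par)) =
        some (pl', par') ∧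
      pl' = (List.range t).map (fun j => ((rootN par j : Nat) : Int)) ++
        List.replicate (N - t) (0:Int) ∧
      par'.length = N ∧ Ranged par' ∧ TermP par' ∧ ∀ j, j < N → rootN par' j = rootN par j := by
  intro t
  induction t with
  | zero =>
    intro _
    refine ⟨List.replicate N (0:Int), par, ?_, by simp, hpl, hR, hT, fun j _ => rfl⟩
    rw [show ((0:Nat):Int) = 0 by rfl, PySem.List.pyRange_one_eq_nil (by omega)]
    rfl
  | succ t ih =>
    intro ht
    obtain ⟨pl1, par1, hfold, hshape, hlen1, hR1, hT1, hroots1⟩ := ih (by omega)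
    have htN : t < N := by omega
    have hpl1len : pl1.length = N := by
      rw [hshape]
      simp [List.length_append, List.length_map, List.length_range, List.length_replicate]
      omega
    have hfa : -(par1.length:Int) ≤ ((t:Nat):Int) := by rw [hlen1]; omega
    have hfb : ((t:Nat):Int) < (par1.length:Int) := by rw [hlen1]; exact_mod_cast htN
    obtain ⟨par2, hfind, hlen2, hR2, hT2, hroots2⟩ := ufFind_ok hR1 hT1 hfa hfb
    have hpt : pidx par1.length ((t:Nat):Int) = t := by
      rw [pidx_of_nonneg _ _ (by omega)]
      omega
    rw [hpt] at hfind
    have hrt : rootN par1 t = rootN par t := hroots1 t htN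
    rw [hrt] at hfind
    have hsetpl : PySem.List.pySet? pl1 ((t:Nat):Int) ((rootN par t : Nat) : Int) =
        some (pl1.set t ((rootN par t : Nat) : Int)) := by
      have := pySet?_pidx pl1 ((t:Nat):Int) ((rootN par t : Nat) : Int)
        (by rw [hpl1len]; omega) (by rw [hpl1len]; exact_mod_cast htN)
      rwa [pidx_of_nonneg _ _ (by omega), Int.toNat_natCast] at this
    have hrange : PySem.List.pyRange 0 ((t+1 : Nat):Int) 1 =
        PySem.List.pyRange 0 ((t:Nat):Int) 1 ++ [((t:Nat):Int)] := by
      have := PySem.List.pyRange_one_succ_right (a := 0) (b := ((t:Nat):Int)) (by omega)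
      rw [← this]
      norm_cast
    have hsetshape : pl1.set t ((rootN par t : Nat) : Int) =
        (List.range (t+1)).map (fun j => ((rootN par j : Nat) : Int)) ++
          List.replicate (N - (t+1)) (0:Int) := by
      rw [hshape]
      have hrep : List.replicate (N - t) (0:Int) = (0:Int) :: List.replicate (N - (t+1)) (0:Int) := by
        rw [show N - t = (N - (t+1)) + 1 by omega, List.replicate_succ]
      rw [hrep]
      have hlA : ((List.range t).map (fun j => ((rootN par j : Nat) : Int))).length = t := by
        simp
      rw [List.set_append_right _ _ (by rw [hlA])]
      rw [List.range_succ, List.map_append]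
      simp [hlA]
    refine ⟨pl1.set t ((rootN par t : Nat) : Int), par2, ?_, hsetshape, by rw [hlen2, hlen1],
      hR2, hT2, ?_⟩
    · rw [hrange, List.foldl_append, hfold, List.foldl_cons]
      rw [mStep3]
      rw [hfind]
      dsimp only
      rw [hsetpl]
      rfl
    · intro j hj
      rw [hroots2 j (by rw [hlen1]; exact hj), hroots1 j hj]

-- --- equality of the distinct-label counts ---

theorem ofList_length_eq (l : List Int) : (PySem.Set.ofList l).length = l.toFinset.card := by
  have hnd := PySem.Set.nodup_ofList l
  have hfs : (PySem.Set.ofList l).toFinset = l.toFinset := by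
    ext x
    simp [List.mem_toFinset, PySem.Set.mem_ofList]
  rw [← List.toFinset_card_of_nodup hnd, hfs]

theorem toFinset_eq_image {l : List Int} {N : Nat} (hl : l.length = N) :
    l.toFinset = (Finset.range N).image (fun j => l.getD j 0) := by
  ext x
  simp only [List.mem_toFinset, Finset.mem_image, Finset.mem_range]
  constructor
  · intro hx
    obtain ⟨j, hj, he⟩ := List.mem_iff_getElem.mp hx
    refine ⟨j, by omega, ?_⟩
    rw [List.getD_eq_getElem?_getD, List.getElem?_eq_getElem hj]
    exact he
  · rintro ⟨j, hj, rfl⟩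
    have hjl : j < l.length := by omega
    rw [List.getD_eq_getElem?_getD, List.getElem?_eq_getElem hjl]
    exact List.getElem_mem hjl

theorem card_image_eq {N : Nat} (f g : Nat → Int)
    (hiff : ∀ j k, j < N → k < N → (f j = f k ↔ g j = g k)) :
    ((Finset.range N).image f).card = ((Finset.range N).image g).card := by
  classical
  refine Finset.card_bij
    (fun a ha => g (Nat.find (show ∃ j, j < N ∧ f j = a by
      simpa [Finset.mem_image, Finset.mem_range] using ha))) ?_ ?_ ?_
  · intro a ha
    have hspec := Nat.find_spec (show ∃ j, j < N ∧ f j = a by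
      simpa [Finset.mem_image, Finset.mem_range] using ha)
    simp only [Finset.mem_image, Finset.mem_range]
    exact ⟨_, hspec.1, rfl⟩
  · intro a1 ha1 a2 ha2 he
    have h1 := Nat.find_spec (show ∃ j, j < N ∧ f j = a1 by
      simpa [Finset.mem_image, Finset.mem_range] using ha1)
    have h2 := Nat.find_spec (show ∃ j, j < N ∧ f j = a2 by
      simpa [Finset.mem_image, Finset.mem_range] using ha2)
    have := (hiff _ _ h1.1 h2.1).mpr he
    rw [← h1.2, ← h2.2, this]
  · intro b hb
    obtain ⟨j, hj, rfl⟩ := by simpa [Finset.mem_image, Finset.mem_range] using hb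
    refine ⟨f j, by simp only [Finset.mem_image, Finset.mem_range]; exact ⟨j, hj, rfl⟩, ?_⟩
    dsimp only
    have hspec := Nat.find_spec (show ∃ j', j' < N ∧ f j' = f j from ⟨j, hj, rfl⟩)
    exact (hiff _ _ hspec.1 hj).mp hspec.2

theorem k_eq {l1 l2 : List Int} {N : Nat} (h1 : l1.length = N) (h2 : l2.length = N)
    (hiff : ∀ j k, j < N → k < N → (l1.getD j 0 = l1.getD k 0 ↔ l2.getD j 0 = l2.getD k 0)) :
    (PySem.Set.ofList l1).length = (PySem.Set.ofList l2).length := by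
  rw [ofList_length_eq, ofList_length_eq, toFinset_eq_image h1, toFinset_eq_image h2]
  exact card_image_eq _ _ hiff

-- --- simulation: the Array-state port computes the List-level model ---

def pairToList (p : Array Int × Array Int) : List Int × List Int := (p.1.toList, p.2.toList)
def rpairToList (p : String × Array Int) : String × List Int := (p.1, p.2.toList)

theorem aGet?_eq (xs : Array Int) (i : Int) : aGet? xs i = PySem.List.pyGet? xs.toList i := by
  unfold aGet? PySem.List.pyGet?
  rw [Array.length_toList]
  cases PySem.List.pyIdx? xs.size i <;> simp [Array.getElem?_toList]

theorem aSet?_eq (xs : Array Int) (i v : Int) :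
    (aSet? xs i v).map Array.toList = PySem.List.pySet? xs.toList i v := by
  unfold aSet? PySem.List.pySet?
  rw [Array.length_toList]
  cases PySem.List.pyIdx? xs.size i <;> simp [Array.toList_setIfInBounds]

theorem ufFind_sim : ∀ (f : Nat) (arr : Array Int) (x : Int),
    (ufFind f arr x).map (fun p => (p.1, p.2.toList)) = mFind f arr.toList x := by
  intro f
  induction f with
  | zero => intro arr x; rfl
  | succ f ih =>
    intro arr x
    unfold ufFind mFind
    rw [← aGet?_eq]
    cases hg : aGet? arr x with
    | none => rfl
    | some p =>
      dsimp only
      by_cases hpx : p = x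
      · rw [if_pos hpx, if_pos hpx]
        rfl
      · rw [if_neg hpx, if_neg hpx, ← ih arr p]
        cases hrec : ufFind f arr p with
        | none => rfl
        | some rp =>
          simp only [Option.map_some]
          rw [← aSet?_eq]
          cases hs : aSet? rp.2 x rp.1 with
          | none => rfl
          | some arr2 => rfl

theorem ufUnion_sim (par rank : Array Int) (x y : Int) :
    (ufUnion par rank x y).map pairToList = mUnion par.toList rank.toList x y := by
  unfold ufUnion mUnion
  rw [Array.length_toList, ← ufFind_sim (par.size + 1) par x]
  cases hf1 : ufFind (par.size + 1) par x with
  | none => rfl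
  | some p1 =>
    simp only [Option.map_some]
    rw [Array.length_toList, ← ufFind_sim (p1.2.size + 1) p1.2 y]
    cases hf2 : ufFind (p1.2.size + 1) p1.2 y with
    | none => rfl
    | some p2 =>
      simp only [Option.map_some]
      rw [← aGet?_eq rank p1.1, ← aGet?_eq rank p2.1]
      cases hg1 : aGet? rank p1.1 with
      | none => cases hg2 : aGet? rank p2.1 <;> rfl
      | some rx =>
        cases hg2 : aGet? rank p2.1 with
        | none => rfl
        | some ry =>
          dsimp only
          by_cases hlt : rx < ry
          · rw [if_pos hlt, if_pos hlt, ← aSet?_eq]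
            cases hs : aSet? p2.2 p1.1 p2.1 with
            | none => rfl
            | some par3 => simp [pairToList]
          · rw [if_neg hlt, if_neg hlt, ← aSet?_eq]
            cases hs : aSet? p2.2 p2.1 p1.1 with
            | none => rfl
            | some par3 =>
              simp only [Option.map_some]
              by_cases heq : rx = ry
              · rw [if_pos heq, if_pos heq, ← aSet?_eq]
                cases hs2 : aSet? rank p1.1 (rx + 1) with
                | none => rfl
                | some rank2 => simp [pairToList]
              · rw [if_neg heq, if_neg heq]
                simp [pairToList]

theorem ufSame_sim (par : Array Int) (x y : Int) :
    (ufSame par x y).map (fun p => (p.1, p.2.toList)) = mSame par.toList x y := by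
  unfold ufSame mSame
  rw [Array.length_toList, ← ufFind_sim (par.size + 1) par x]
  cases hf1 : ufFind (par.size + 1) par x with
  | none => rfl
  | some p1 =>
    simp only [Option.map_some]
    rw [Array.length_toList, ← ufFind_sim (p1.2.size + 1) p1.2 y]
    cases hf2 : ufFind (p1.2.size + 1) p1.2 y with
    | none => rfl
    | some p2 => simp

theorem stepA1_sim (a_list b_list c_list : List Int) (st : Option (Array Int × Array Int)) (i : Int) :
    (stepA1 a_list b_list c_list st i).map pairToList
      = mStep1 a_list b_list c_list (st.map pairToList) i := by
  cases st with
  | none => rfl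
  | some p =>
    obtain ⟨par, rank⟩ := p
    unfold stepA1 mStep1
    dsimp only [Option.map_some, pairToList]
    cases hc : PySem.List.pyGet? c_list i with
    | none => rfl
    | some cv =>
      dsimp only
      by_cases h0 : cv = 0
      · rw [if_pos h0, if_pos h0]
        cases ha : PySem.List.pyGet? a_list i with
        | none => cases hb : PySem.List.pyGet? b_list i <;> rfl
        | some av =>
          cases hb : PySem.List.pyGet? b_list i with
          | none => rfl
          | some bv => exact ufUnion_sim par rank av bv
      · rw [if_neg h0, if_neg h0]
        rfl

theorem fold1_sim (a_list b_list c_list : List Int) :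
    ∀ (l : List Int) (st : Option (Array Int × Array Int)),
    (l.foldl (stepA1 a_list b_list c_list) st).map pairToList
      = l.foldl (mStep1 a_list b_list c_list) (st.map pairToList) := by
  intro l
  induction l with
  | nil => intro st; rfl
  | cons i l ih =>
    intro st
    rw [List.foldl_cons, List.foldl_cons, ih, stepA1_sim]

theorem stepA2_sim (a_list b_list c_list : List Int) (st : Option (String × Array Int)) (i : Int) :
    (stepA2 a_list b_list c_list st i).map rpairToList
      = mStep2 a_list b_list c_list (st.map rpairToList) i := by
  cases st with
  | none => rfl
  | some p =>
    obtain ⟨res, par⟩ := p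
    unfold stepA2 mStep2
    dsimp only [Option.map_some, rpairToList]
    cases hc : PySem.List.pyGet? c_list i with
    | none => rfl
    | some cv =>
      dsimp only
      by_cases h1 : cv = 1
      · rw [if_pos h1, if_pos h1]
        cases ha : PySem.List.pyGet? a_list i with
        | none => cases hb : PySem.List.pyGet? b_list i <;> rfl
        | some av =>
          cases hb : PySem.List.pyGet? b_list i with
          | none => rfl
          | some bv =>
            dsimp only
            rw [← ufSame_sim par av bv]
            cases hsame : ufSame par av bv with
            | none => rfl
            | some sp => simp [rpairToList]
      · rw [if_neg h1, if_neg h1]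
        rfl

theorem fold2_sim (a_list b_list c_list : List Int) :
    ∀ (l : List Int) (st : Option (String × Array Int)),
    (l.foldl (stepA2 a_list b_list c_list) st).map rpairToList
      = l.foldl (mStep2 a_list b_list c_list) (st.map rpairToList) := by
  intro l
  induction l with
  | nil => intro st; rfl
  | cons i l ih =>
    intro st
    rw [List.foldl_cons, List.foldl_cons, ih, stepA2_sim]

theorem stepA3_sim (st : Option (Array Int × Array Int)) (i : Int) :
    (stepA3 st i).map pairToList = mStep3 (st.map pairToList) i := by
  cases st with
  | none => rfl
  | some p =>
    obtain ⟨pl, par⟩ := p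
    unfold stepA3 mStep3
    dsimp only [Option.map_some, pairToList]
    rw [Array.length_toList, ← ufFind_sim (par.size + 1) par i]
    cases hf : ufFind (par.size + 1) par i with
    | none => rfl
    | some rp =>
      simp only [Option.map_some]
      rw [← aSet?_eq]
      cases hs : aSet? pl i rp.1 with
      | none => rfl
      | some pl2 => rfl

theorem fold3_sim : ∀ (l : List Int) (st : Option (Array Int × Array Int)),
    (l.foldl stepA3 st).map pairToList = l.foldl mStep3 (st.map pairToList) := by
  intro l
  induction l with
  | nil => intro st; rfl
  | cons i l ih =>
    intro st
    rw [List.foldl_cons, List.foldl_cons, ih, stepA3_sim]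

-- len(set(xs)) through a hash set equals the PySem set model
theorem hs_fold_size : ∀ (l : List Int) (hs : Std.HashSet Int) (t : PySem.Set Int),
    (∀ x : Int, x ∈ hs ↔ x ∈ t) → hs.size = t.length →
    (l.foldl (fun s v => s.insert v) hs).size = (PySem.Set.update t l).length ∧
    (∀ x : Int, x ∈ l.foldl (fun s v => s.insert v) hs ↔ x ∈ PySem.Set.update t l) := by
  intro l
  induction l with
  | nil => intro hs t hm hsz; exact ⟨hsz, hm⟩
  | cons v l ih =>
    intro hs t hm hsz
    have h1 : (hs.insert v).size = (PySem.Set.add t v).length := by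
      rw [Std.HashSet.size_insert, PySem.Set.add_eq_ite]
      by_cases hv : v ∈ t
      · rw [if_pos ((hm v).mpr hv), if_pos hv, hsz]
      · rw [if_neg (fun hh => hv ((hm v).mp hh)), if_neg hv]
        simp [hsz]
    have h2 : ∀ x : Int, x ∈ hs.insert v ↔ x ∈ PySem.Set.add t v := by
      intro x
      rw [Std.HashSet.mem_insert, PySem.Set.mem_add]
      simp only [beq_iff_eq, hm x]
      tauto
    have := ih (hs.insert v) (PySem.Set.add t v) h2 h1
    rw [List.foldl_cons, PySem.Set.update_cons]
    exact this

theorem hs_size (l : List Int) :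
    (l.foldl (fun s v => s.insert v) (∅ : Std.HashSet Int)).size
      = (PySem.Set.ofList l).length := by
  have h := (hs_fold_size l ∅ PySem.Set.empty
    (by intro x; simp [Std.HashSet.not_mem_empty, PySem.Set.empty])
    (by simp [Std.HashSet.size_empty, PySem.Set.empty])).1
  rw [h, show (PySem.Set.empty : PySem.Set Int) = [] from rfl, PySem.Set.update_nil_left]

-- ===== VERDICT (by name: the statement is the Claim_ definition above) =====
theorem is_graph_possible_spec : Claim_equal_is_graph_possible := by
  intro n m q a_list b_list c_list _hdom hpre
  unfold Spec_is_graph_possible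
  obtain ⟨hcne, hql, hedges⟩ := hpre
  have hE : ∀ i ∈ PySem.List.pyRange 0 q 1, EdgeOK n a_list b_list c_list i := by
    intro i hi
    obtain ⟨h0i, hiq⟩ := (PySem.List.mem_pyRange_one).mp hi
    have hilen : i < (c_list.length : Int) := by omega
    have hgc : PySem.List.pyGet? c_list i = some (c_list.getD i.toNat 0) := by
      have := pyGet?_pidx c_list i (by omega) hilen
      rwa [pidx_of_nonneg _ _ h0i] at this
    refine ⟨c_list.getD i.toNat 0, hgc, ?_⟩
    intro hc01
    obtain ⟨hal, hbl, ha1, ha2, hb1, hb2⟩ := hedges i.toNat (by omega) hc01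
    have hga : PySem.List.pyGet? a_list i = some (a_list.getD i.toNat 0) := by
      have := pyGet?_pidx a_list i (by omega) (by omega)
      rwa [pidx_of_nonneg _ _ h0i] at this
    have hgb : PySem.List.pyGet? b_list i = some (b_list.getD i.toNat 0) := by
      have := pyGet?_pidx b_list i (by omega) (by omega)
      rwa [pidx_of_nonneg _ _ h0i] at this
    exact ⟨_, _, hga, hgb, ha1, ha2, hb1, hb2⟩
  set N := n.toNat with hN
  have hbound : ∀ v : Int, -n ≤ v → v < n → -(N:Int) ≤ v ∧ v < (N:Int) := by
    intro v hv1 hv2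
    constructor <;> omega
  have hn11 : n - 1 + 1 = n := by ring
  have hlen0 : (PySem.List.pyRange 0 n 1).length = N := by
    rw [PySem.List.length_pyRange_one]
    simp [hN]
  have hget0 : ∀ j, j < N → (PySem.List.pyRange 0 n 1).getD j 0 = (j : Int) := by
    intro j hj
    have hjl : j < (PySem.List.pyRange 0 n 1).length := by rw [hlen0]; exact hj
    rw [List.getD_eq_getElem?_getD, List.getElem?_eq_getElem hjl]
    simp [PySem.List.getElem_pyRange_one]
  have hstp0 : ∀ j, j < N → stp (PySem.List.pyRange 0 n 1) j = j := by
    intro j hj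
    unfold stp
    rw [hget0 j hj]
    omega
  have hroot0 : ∀ j, j < N → rootN (PySem.List.pyRange 0 n 1) j = j :=
    fun j hj => rootN_of_root (hstp0 j hj)
  have hI0 : InvAB N (PySem.List.pyRange 0 n 1) (PySem.List.pyRange 0 n 1)
      (List.replicate n.toNat (0:Int)) := by
    refine ⟨hlen0, by simp [hN], hlen0, ?_, ?_, ?_⟩
    · intro j hj
      rw [hlen0] at hj
      rw [hget0 j hj]
      refine ⟨by omega, ?_⟩
      rw [hlen0]
      omega
    · intro j hj
      rw [hlen0] at hj
      exact ⟨1, by simp [rt, hstp0 j hj]⟩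
    · intro j k hj hk
      rw [hroot0 j hj, hroot0 k hk, hget0 j hj, hget0 k hk]
      exact (Int.natCast_inj).symm
  obtain ⟨par1, rank1, comp, hfA1, hfB1, hI1⟩ := phase1_run hbound _ hE _ _ _ hI0
  obtain ⟨hpl1, hrl1, hcl1, hR1, hT1, hiff1⟩ := hI1
  obtain ⟨res2, par2, hfA2, hfB2, hI2'⟩ :=
    phase2_run hbound hcl1 _ hE par1 "Yes" ⟨hpl1, hR1, hT1, hiff1⟩
  obtain ⟨hpl2, hR2, hT2, hiff2⟩ := hI2'
  have hphase3 : ∃ pl3 par3,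
      (PySem.List.pyRange 0 n 1).foldl mStep3 (some (List.replicate N (0:Int), par2)) =
        some (pl3, par3) ∧
      pl3.length = N ∧ (∀ j, j < N → pl3.getD j 0 = ((rootN par2 j : Nat) : Int)) := by
    by_cases hn0 : 0 ≤ n
    · have hcast : ((N:Nat):Int) = n := by omega
      obtain ⟨pl', par', h1, h2, _, _, _, _⟩ := phase3_run hpl2 hR2 hT2 N (le_refl N)
      rw [hcast] at h1
      have h2' : pl' = (List.range N).map (fun j => ((rootN par2 j : Nat) : Int)) := by
        simpa using h2
      refine ⟨pl', par', h1, by simp [h2'], ?_⟩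
      intro j hj
      rw [h2', List.getD_eq_getElem?_getD, List.getElem?_eq_getElem (by simpa using hj)]
      simp
    · have hN0 : N = 0 := by omega
      refine ⟨List.replicate N (0:Int), par2, ?_, by simp [hN0], fun j hj => by omega⟩
      rw [PySem.List.pyRange_one_eq_nil (by omega)]
      rfl
  obtain ⟨pl3, par3, hfold3, hpl3len, hget3⟩ := hphase3
  have hkeq : (PySem.Set.ofList pl3).length = (PySem.Set.ofList comp).length := by
    apply k_eq hpl3len hcl1
    intro j k hj hk
    rw [hget3 j hj, hget3 k hk]
    constructor
    · intro h
      exact (hiff2 j k hj hk).mp (by exact_mod_cast h)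
    · intro h
      exact_mod_cast (hiff2 j k hj hk).mpr h
  obtain ⟨mx, hmx⟩ : ∃ mx, PySem.List.max? c_list (fun v => v) = some mx := by
    cases hcase : PySem.List.max? c_list (fun v => v) with
    | none => exact absurd ((PySem.List.max?_eq_none_iff _ _).mp hcase) hcne
    | some mx => exact ⟨mx, rfl⟩
  -- transfer the List-level run to the Array-state port
  have hfA1arr : (((PySem.List.pyRange 0 q 1).foldl (stepA1 a_list b_list c_list)
      (some ((PySem.List.pyRange 0 n 1).toArray, Array.replicate N (0:Int))))).map pairToList
      = some (par1, rank1) := by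
    rw [fold1_sim]
    have hinit : pairToList ((PySem.List.pyRange 0 n 1).toArray, Array.replicate N (0:Int))
        = (PySem.List.pyRange 0 n 1, List.replicate n.toNat (0:Int)) := by
      simp [pairToList, List.toList_toArray, Array.toList_replicate, hN]
    simp only [Option.map_some]
    rw [hinit]
    exact hfA1
  obtain ⟨pA1, hA1, hA1a, hA1b⟩ : ∃ p, (PySem.List.pyRange 0 q 1).foldl (stepA1 a_list b_list c_list)
      (some ((PySem.List.pyRange 0 n 1).toArray, Array.replicate N (0:Int))) = some p ∧
      p.1.toList = par1 ∧ p.2.toList = rank1 := by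
    cases h : (PySem.List.pyRange 0 q 1).foldl (stepA1 a_list b_list c_list)
        (some ((PySem.List.pyRange 0 n 1).toArray, Array.replicate N (0:Int))) with
    | none => rw [h] at hfA1arr; simp at hfA1arr
    | some p =>
      rw [h] at hfA1arr
      simp only [Option.map_some, pairToList, Option.some_inj, Prod.mk.injEq] at hfA1arr
      exact ⟨p, rfl, hfA1arr.1, hfA1arr.2⟩
  have hfA2arr : (((PySem.List.pyRange 0 q 1).foldl (stepA2 a_list b_list c_list)
      (some ("Yes", pA1.1)))).map rpairToList = some (res2, par2) := by
    rw [fold2_sim]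
    simp only [Option.map_some, rpairToList, hA1a]
    exact hfA2
  obtain ⟨pA2, hA2, hA2a, hA2b⟩ : ∃ p, (PySem.List.pyRange 0 q 1).foldl (stepA2 a_list b_list c_list)
      (some ("Yes", pA1.1)) = some p ∧ p.1 = res2 ∧ p.2.toList = par2 := by
    cases h : (PySem.List.pyRange 0 q 1).foldl (stepA2 a_list b_list c_list)
        (some ("Yes", pA1.1)) with
    | none => rw [h] at hfA2arr; simp at hfA2arr
    | some p =>
      rw [h] at hfA2arr
      simp only [Option.map_some, rpairToList, Option.some_inj, Prod.mk.injEq] at hfA2arr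
      exact ⟨p, rfl, hfA2arr.1, hfA2arr.2⟩
  have hfA3arr : (((PySem.List.pyRange 0 n 1).foldl stepA3
      (some (Array.replicate N (0:Int), pA2.2)))).map pairToList = some (pl3, par3) := by
    rw [fold3_sim]
    simp only [Option.map_some, pairToList, Array.toList_replicate, hA2b]
    exact hfold3
  obtain ⟨pA3, hA3, hA3a, hA3b⟩ : ∃ p, (PySem.List.pyRange 0 n 1).foldl stepA3
      (some (Array.replicate N (0:Int), pA2.2)) = some p ∧
      p.1.toList = pl3 ∧ p.2.toList = par3 := by
    cases h : (PySem.List.pyRange 0 n 1).foldl stepA3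
        (some (Array.replicate N (0:Int), pA2.2)) with
    | none => rw [h] at hfA3arr; simp at hfA3arr
    | some p =>
      rw [h] at hfA3arr
      simp only [Option.map_some, pairToList, Option.some_inj, Prod.mk.injEq] at hfA3arr
      exact ⟨p, rfl, hfA3arr.1, hfA3arr.2⟩
  have hkA : ((pA3.1.foldl (fun s v => s.insert v) (∅ : Std.HashSet Int)).size : Int)
      = ((comp.foldl (fun s v => s.insert v) (∅ : Std.HashSet Int)).size : Int) := by
    rw [← Array.foldl_toList, hA3a, hs_size, hs_size, hkeq]
  unfold is_graph_possible is_graph_possible_alt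
  rw [hn11, ← hN]
  rw [hA1, hfB1]
  dsimp only
  rw [hA2, hfB2]
  dsimp only
  rw [hA3]
  dsimp only
  rw [hmx]
  dsimp only
  rw [hkA, hA2a]
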